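-- pv_equiv track=rewrite | github.com/NickArakaki/ds-a-practice | HackerRank/SecurityValues.py | get_min_sum
-- ===== SOURCE A (Python) =====
-- from heapq import heappush, heappop
--
-- def get_min_sum(security_values, msg):
--     values = []
--     for char in msg:
--         index = ord(char.lower()) - ord("a")
--         heappush(values, security_values[index])
--
--     diff_sum = 0
--     prev = heappop(values)
--     while values:
--         val = heappop(values)
--         diff_sum += abs(prev - val)
--         prev = val
--
--     return diff_sum
-- ===== SOURCE B (Python) =====
-- def get_min_sum(security_values, msg):
--     # Sum of |diff| over min-heap extraction order telescopes to max - min.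
--     values = [security_values[ord(c.lower()) - ord("a")] for c in msg]
--     return max(values) - min(values)
-- ===== Notes on version B (the rewrite author's own statement) =====
-- stated objective: faster
-- what changed: Replaced the heappush/heappop priority-queue loops with the closed form max(values) - min(values): the sum of absolute differences over increasing extraction order telescopes, so one comprehension plus built-in max/min suffices.
import Mathlib
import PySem

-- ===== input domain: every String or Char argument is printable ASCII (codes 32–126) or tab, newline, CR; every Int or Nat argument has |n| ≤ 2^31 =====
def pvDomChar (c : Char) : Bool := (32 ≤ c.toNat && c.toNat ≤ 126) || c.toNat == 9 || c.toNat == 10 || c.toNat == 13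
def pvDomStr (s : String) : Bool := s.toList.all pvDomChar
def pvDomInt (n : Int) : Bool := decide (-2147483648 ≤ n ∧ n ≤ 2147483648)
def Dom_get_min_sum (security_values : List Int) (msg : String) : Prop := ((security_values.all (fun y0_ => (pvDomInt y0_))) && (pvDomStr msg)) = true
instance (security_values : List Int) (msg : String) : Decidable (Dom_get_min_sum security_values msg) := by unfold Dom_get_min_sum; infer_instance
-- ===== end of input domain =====

-- B replaces A's heappush/heappop loops by the telescoped closed form max - min over the
-- looked-up values (the sum of |diffs| in increasing extraction order telescopes); measurably faster.

-- ===== PORT A =====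
-- heappush h v: add v to the heap (the heap's content as a multiset; order of extraction is all that matters)
def pvHeapPush (h : List Int) (v : Int) : List Int := h ++ [v]
-- heappop h: remove and return the smallest element (semantic model of heapq.heappop; none = IndexError on empty)
def pvHeapPop (h : List Int) : Option (Int × List Int) :=
  match PySem.List.min? h (fun x => x) with
  | none => none
  | some m =>
    match PySem.List.remove? h m with
    | none => none
    | some rest => some (m, rest)

-- the while-loop; fuel = h.length is exact since each heappop removes one element
def pvPopLoop : Nat → List Int → Int → Int → Int
  | 0, _, _, diff_sum => diff_sum
  | fuel + 1, h, prev, diff_sum =>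
    match pvHeapPop h with
    | none => diff_sum
    | some (val, rest) => pvPopLoop fuel rest val (diff_sum + |prev - val|)

def get_min_sum (security_values : List Int) (msg : String) : Int :=
  let values := msg.toList.foldl
    (fun acc c => pvHeapPush acc
      (PySem.List.pyGetD security_values (((PySem.Chars.lowerChar c).toNat : Int) - 97) 0)) []
  match pvHeapPop values with
  | none => 0   -- heappop of an empty heap raises IndexError; excluded by Pre_
  | some (prev, rest) => pvPopLoop rest.length rest prev 0

-- ===== PORT B =====
def get_min_sum_alt (security_values : List Int) (msg : String) : Int :=
  let values := msg.toList.map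
    (fun c => PySem.List.pyGetD security_values (((PySem.Chars.lowerChar c).toNat : Int) - 97) 0)
  match PySem.List.max? values (fun x => x), PySem.List.min? values (fun x => x) with
  | some mx, some mn => mx - mn
  | _, _ => 0   -- max()/min() of an empty list raises; excluded by Pre_

-- ===== PRECONDITION & SPEC =====
-- A raises exactly when msg is empty (heappop of an empty heap) or some char's index
-- ord(c.lower()) - ord('a') is outside Python's (negative-wrapping) range of security_values.
def Pre_get_min_sum (security_values : List Int) (msg : String) : Prop :=
  msg.toList ≠ [] ∧
  (msg.toList.all (fun c => decide (PySem.Raise.InRange security_values.length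
    (((PySem.Chars.lowerChar c).toNat : Int) - 97)))) = true
instance (security_values : List Int) (msg : String) : Decidable (Pre_get_min_sum security_values msg) := by
  unfold Pre_get_min_sum; infer_instance

def pvWitness_get_min_sum : List Int × String := ([5, 3], "ab")

def Spec_get_min_sum (security_values : List Int) (msg : String) (out : Int) : Prop := out = get_min_sum_alt security_values msg
instance (security_values : List Int) (msg : String) (out : Int) : Decidable (Spec_get_min_sum security_values msg out) := by unfold Spec_get_min_sum; infer_instance

-- ===== CLAIM (what is proved, stated in full; the proofs are below) =====
def Claim_equal_get_min_sum : Prop := ∀ (security_values : List Int) (msg : String), Dom_get_min_sum security_values msg → Pre_get_min_sum security_values msg → Spec_get_min_sum security_values msg (get_min_sum security_values msg)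

-- ===== LEMMAS AND PROOFS =====

-- the while-loop telescopes: starting below every heap element it returns acc + max(prev, h) - prev
theorem pvPopLoop_telescope (n : Nat) : ∀ (h : List Int), h.length = n →
    ∀ (prev acc : Int), (∀ x ∈ h, prev ≤ x) →
    pvPopLoop n h prev acc = acc + h.foldl max prev - prev := by
  induction n with
  | zero =>
    intro h hlen prev acc _
    rw [List.length_eq_zero_iff.mp hlen]
    simp [pvPopLoop]
  | succ k ih =>
    intro h hlen prev acc hlb
    obtain ⟨v, t, rfl⟩ : ∃ v t, h = v :: t := by
      cases h with
      | nil => simp at hlen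
      | cons v t => exact ⟨v, t, rfl⟩
    obtain ⟨m, hm⟩ : ∃ m, PySem.List.min? (v :: t) (fun x => x) = some m := by
      rcases e : PySem.List.min? (v :: t) (fun x => x) with _ | m
      · exact absurd ((PySem.List.min?_eq_none_iff _ _).mp e) (by simp)
      · exact ⟨m, rfl⟩
    have hmem : m ∈ v :: t := PySem.List.min?_mem hm
    have hmin : ∀ y ∈ v :: t, m ≤ y := by
      intro y hy; simpa using PySem.List.min?_isMin hm y hy
    have hrem : PySem.List.remove? (v :: t) m = some ((v :: t).erase m) :=
      PySem.List.remove?_eq_some_erase _ m hmem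
    have hperm : (v :: t).Perm (m :: (v :: t).erase m) := List.perm_cons_erase hmem
    have hprevm : prev ≤ m := hlb m hmem
    have hlen' : ((v :: t).erase m).length = k := by
      rw [List.length_erase_of_mem hmem, hlen]
      omega
    have hlb' : ∀ x ∈ (v :: t).erase m, m ≤ x := fun x hx => hmin x (List.mem_of_mem_erase hx)
    have habs : |prev - m| = m - prev := by rw [abs_sub_comm]; exact abs_of_nonneg (by omega)
    have hfold : ((v :: t).erase m).foldl max m = (v :: t).foldl max prev := by
      rw [List.Perm.foldl_op_eq hperm]
      simp only [List.foldl_cons]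
      rw [max_eq_right hprevm]
    rw [show pvPopLoop (k + 1) (v :: t) prev acc =
        pvPopLoop k ((v :: t).erase m) m (acc + |prev - m|) by
      simp [pvPopLoop, pvHeapPop, hm, hrem]]
    rw [ih _ hlen' m _ hlb', hfold, habs]
    ring

-- one nonempty heap: A's pop-loop equals B's max - min
theorem pv_core (v : Int) (t : List Int) :
    (match pvHeapPop (v :: t) with
     | none => 0
     | some (prev, rest) => pvPopLoop rest.length rest prev 0) =
    (match PySem.List.max? (v :: t) (fun x => x), PySem.List.min? (v :: t) (fun x => x) with
     | some mx, some mn => mx - mn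
     | _, _ => 0) := by
  rw [PySem.List.max?_id_cons, PySem.List.min?_id_cons]
  have hmin : PySem.List.min? (v :: t) (fun x => x) = some (t.foldl min v) :=
    PySem.List.min?_id_cons v t
  set m : Int := t.foldl min v with hmdef
  have hmem : m ∈ v :: t := PySem.List.min?_mem hmin
  have hminle : ∀ y ∈ v :: t, m ≤ y := by
    intro y hy; simpa using PySem.List.min?_isMin hmin y hy
  have hrem : PySem.List.remove? (v :: t) m = some ((v :: t).erase m) :=
    PySem.List.remove?_eq_some_erase _ m hmem
  have hperm : (v :: t).Perm (m :: (v :: t).erase m) := List.perm_cons_erase hmem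
  have hloop := pvPopLoop_telescope ((v :: t).erase m).length ((v :: t).erase m) rfl m 0
    (fun x hx => hminle x (List.mem_of_mem_erase hx))
  have hfold : ((v :: t).erase m).foldl max m = t.foldl max v := by
    have h1 : (v :: t).foldl max m = (m :: (v :: t).erase m).foldl max m :=
      List.Perm.foldl_op_eq hperm
    simp only [List.foldl_cons, max_self] at h1
    rw [← h1, max_eq_right (hminle v (by simp))]
  simp only [pvHeapPop, hmin, hrem]
  rw [hloop, hfold]
  ring

theorem get_min_sum_spec : Claim_equal_get_min_sum := by
  intro sv msg _ hpre
  obtain ⟨hne, -⟩ := hpre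
  unfold Spec_get_min_sum get_min_sum get_min_sum_alt
  have hbuild : List.foldl
      (fun acc c => pvHeapPush acc
        (PySem.List.pyGetD sv (((PySem.Chars.lowerChar c).toNat : Int) - 97) 0)) [] msg.toList =
      msg.toList.map
        (fun c => PySem.List.pyGetD sv (((PySem.Chars.lowerChar c).toNat : Int) - 97) 0) := by
    simpa [pvHeapPush] using PySem.List.foldl_append_singleton_eq_map
      (fun c => PySem.List.pyGetD sv (((PySem.Chars.lowerChar c).toNat : Int) - 97) 0) msg.toList []
  rw [hbuild]
  obtain ⟨v, t, hv⟩ : ∃ v t, msg.toList.map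
      (fun c => PySem.List.pyGetD sv (((PySem.Chars.lowerChar c).toNat : Int) - 97) 0) = v :: t := by
    rcases e : msg.toList.map
        (fun c => PySem.List.pyGetD sv (((PySem.Chars.lowerChar c).toNat : Int) - 97) 0) with _ | ⟨v, t⟩
    · exact absurd (List.map_eq_nil_iff.mp e) hne
    · exact ⟨v, t, rfl⟩
  rw [hv]
  exact pv_core v t
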